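-- pv_equiv track=rewrite | github.com/L1kami/11 | 11,2.py | generate_cube_numbers
-- ===== SOURCE A (Python) =====
-- from typing import Generator
--
-- def generate_cube_numbers(end_limit: int) -> Generator[int, None, None]:
--     """
--     Генерує куби чисел починаючи з 2, поки результат менший за end_limit.
--     """
--     n = 2
--     while True:
--         cube = n ** 3
--
--         if cube >= end_limit:
--             return
--
--         yield cube
--         n += 1
-- ===== SOURCE B (Python) =====
-- def generate_cube_numbers(end_limit):
--     # Binary-search the smallest n >= 2 with n**3 >= end_limit, then emit
--     # the cubes of range(2, n) without any per-element comparison.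
--     lo = 2
--     hi = end_limit if end_limit > 2 else 2
--     while lo < hi:
--         mid = (lo + hi) // 2
--         if mid ** 3 >= end_limit:
--             hi = mid
--         else:
--             lo = mid + 1
--     yield from (n ** 3 for n in range(2, lo))
-- ===== Notes on version B (the rewrite author's own statement) =====
-- stated objective: alternative
-- what changed: A tests every candidate's cube in a linear generate-and-compare loop; B binary-searches the smallest n >= 2 with n**3 >= end_limit and then maps cubing over range(2, n) with no per-element comparison.
import Mathlib
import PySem

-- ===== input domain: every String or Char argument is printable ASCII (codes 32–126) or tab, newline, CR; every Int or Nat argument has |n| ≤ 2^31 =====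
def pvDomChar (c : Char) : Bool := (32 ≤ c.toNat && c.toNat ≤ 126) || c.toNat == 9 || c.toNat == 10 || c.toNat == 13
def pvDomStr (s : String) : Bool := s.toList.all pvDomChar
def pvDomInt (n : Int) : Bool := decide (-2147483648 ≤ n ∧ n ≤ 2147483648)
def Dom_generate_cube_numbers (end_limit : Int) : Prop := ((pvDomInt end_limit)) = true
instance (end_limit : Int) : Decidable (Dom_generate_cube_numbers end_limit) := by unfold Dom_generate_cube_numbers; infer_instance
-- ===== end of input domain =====

-- B replaces A's linear cube-and-compare loop by a binary search for the first n ≥ 2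
-- with n^3 ≥ end_limit, then emits the cubes of range(2, n) with no per-element test.

-- ===== PORT A =====
-- A's `while True` loop, step for step; the fuel only makes the loop total
-- (cubeLoop_eq below shows the chosen fuel is never exhausted).
def cubeLoop (end_limit : Int) (n : Int) : Nat → List Int
  | 0 => []
  | fuel + 1 =>
    let cube := n ^ 3
    if cube ≥ end_limit then [] else cube :: cubeLoop end_limit (n + 1) fuel

def generate_cube_numbers (end_limit : Int) : List Int :=
  cubeLoop end_limit 2 (end_limit.toNat + 1)

-- ===== PORT B =====
-- Source B's `while lo < hi` binary-search loop (terminates since hi - lo shrinks).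
def cubeSearch (end_limit lo hi : Int) : Int :=
  if h : lo < hi then
    let mid := PySem.Int.floordiv (lo + hi) 2
    if mid ^ 3 ≥ end_limit then cubeSearch end_limit lo mid
    else cubeSearch end_limit (mid + 1) hi
  else lo
termination_by (hi - lo).toNat
decreasing_by
  · have hm : PySem.Int.floordiv (lo + hi) 2 = (lo + hi) / 2 :=
      PySem.Int.floordiv_eq_ediv_of_pos (by norm_num)
    simp only [hm]; omega
  · have hm : PySem.Int.floordiv (lo + hi) 2 = (lo + hi) / 2 :=
      PySem.Int.floordiv_eq_ediv_of_pos (by norm_num)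
    simp only [hm]; omega

def generate_cube_numbers_alt (end_limit : Int) : List Int :=
  let hi := if end_limit > 2 then end_limit else 2
  (PySem.List.pyRange 2 (cubeSearch end_limit 2 hi) 1).map (fun n => n ^ 3)

-- ===== PRECONDITION & SPEC =====
def Spec_generate_cube_numbers (end_limit : Int) (out : List Int) : Prop := out = generate_cube_numbers_alt end_limit
instance (end_limit : Int) (out : List Int) : Decidable (Spec_generate_cube_numbers end_limit out) := by unfold Spec_generate_cube_numbers; infer_instance

-- ===== CLAIM (what is proved, stated in full; the proofs are below) =====
def Claim_equal_generate_cube_numbers : Prop := ∀ (end_limit : Int), Dom_generate_cube_numbers end_limit → Spec_generate_cube_numbers end_limit (generate_cube_numbers end_limit)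

-- ===== LEMMAS AND PROOFS =====

-- The binary search returns the least r in [lo, hi] with end_limit ≤ r^3,
-- under the invariants it is started with.
theorem cubeSearch_correct (el : Int) : ∀ (k : Nat) (lo hi : Int),
    (hi - lo).toNat = k → 2 ≤ lo → lo ≤ hi → (lo = 2 ∨ (lo - 1) ^ 3 < el) → el ≤ hi ^ 3 →
    lo ≤ cubeSearch el lo hi ∧ cubeSearch el lo hi ≤ hi ∧
      el ≤ (cubeSearch el lo hi) ^ 3 ∧
      (cubeSearch el lo hi = 2 ∨ (cubeSearch el lo hi - 1) ^ 3 < el) := by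
  intro k
  induction k using Nat.strong_induction_on with
  | _ k ih =>
    intro lo hi hk h2 hlh hlo hhi
    rw [cubeSearch]
    by_cases h : lo < hi
    · simp only [h, dif_pos]
      have hm : PySem.Int.floordiv (lo + hi) 2 = (lo + hi) / 2 :=
        PySem.Int.floordiv_eq_ediv_of_pos (by norm_num)
      have hb : lo ≤ PySem.Int.floordiv (lo + hi) 2 ∧ PySem.Int.floordiv (lo + hi) 2 < hi := by
        rw [hm]; omega
      by_cases hc : PySem.Int.floordiv (lo + hi) 2 ^ 3 ≥ el
      · simp only [hc, if_pos]
        exact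
          have h' := ih ((PySem.Int.floordiv (lo + hi) 2 - lo).toNat) (by omega) lo
            (PySem.Int.floordiv (lo + hi) 2) rfl h2 hb.1 hlo hc
          ⟨h'.1, by omega, h'.2.2.1, h'.2.2.2⟩
      · simp only [hc, if_neg, not_false_iff]
        have h' := ih ((hi - (PySem.Int.floordiv (lo + hi) 2 + 1)).toNat) (by omega)
          (PySem.Int.floordiv (lo + hi) 2 + 1) hi rfl (by omega)
          (by omega) (Or.inr (by simpa using not_le.mp hc)) hhi
        exact ⟨by omega, h'.2.1, h'.2.2.1, h'.2.2.2⟩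
    · simp only [h, dif_neg, not_false_iff]
      have : lo = hi := le_antisymm hlh (not_lt.mp h)
      exact ⟨le_refl _, hlh, this ▸ hhi, hlo⟩

-- A's loop, given enough fuel, produces exactly the cubes of [n, r) when r is
-- the first point at or after n whose cube reaches end_limit.
theorem cubeLoop_eq (el : Int) : ∀ (fuel : Nat) (n r : Int),
    2 ≤ n → n ≤ r → el ≤ r ^ 3 → (∀ k : Int, n ≤ k → k < r → k ^ 3 < el) →
    (r - n).toNat ≤ fuel →
    cubeLoop el n fuel = (PySem.List.pyRange n r 1).map (fun m => m ^ 3) := by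
  intro fuel
  induction fuel with
  | zero =>
    intro n r h2 hnr hr hk hfuel
    have : r = n := by omega
    subst this
    simp [cubeLoop, PySem.List.pyRange_one_eq_nil (le_refl r)]
  | succ f ihf =>
    intro n r h2 hnr hr hk hfuel
    rw [cubeLoop]
    by_cases hc : n ^ 3 ≥ el
    · have hnr' : n = r := by
        by_contra hne
        exact absurd (hk n (le_refl n) (by omega)) (not_lt.mpr hc)
      subst hnr'
      simp [PySem.List.pyRange_one_eq_nil (le_refl n), hc]
    · have hlt : n < r := by
        rcases lt_or_eq_of_le hnr with h' | h'
        · exact h'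
        · exact absurd (h' ▸ hr) (by simpa using hc)
      rw [PySem.List.pyRange_one_cons hlt]
      simp only [hc, if_neg, not_false_iff, List.map_cons]
      exact congrArg _ (ihf (n + 1) r (by omega) (by omega) hr
        (fun k hk1 hk2 => hk k (by omega) hk2) (by omega))

-- ===== VERDICT (by name: the statement is the Claim_ definition above) =====
theorem generate_cube_numbers_spec : Claim_equal_generate_cube_numbers := by
  intro el _
  unfold Spec_generate_cube_numbers generate_cube_numbers generate_cube_numbers_alt
  set hi0 : Int := if el > 2 then el else 2 with hhi0
  have hhi0b : 2 ≤ hi0 ∧ el ≤ hi0 ^ 3 ∧ hi0 ≤ max el 2 := by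
    rw [hhi0]
    by_cases h : el > 2
    · simp only [h, if_pos]
      refine ⟨by omega, ?_, by omega⟩
      nlinarith [sq_nonneg el]
    · simp only [h, if_neg, not_false_iff]
      exact ⟨le_refl 2, by norm_num; omega, by omega⟩
  obtain ⟨hr1, hr2, hr3, hr4⟩ :=
    cubeSearch_correct el ((hi0 - 2).toNat) 2 hi0 rfl (le_refl 2) hhi0b.1
      (Or.inl rfl) hhi0b.2.1
  set r := cubeSearch el 2 hi0 with hrdef
  apply cubeLoop_eq el (el.toNat + 1) 2 r (le_refl 2) hr1 hr3
  · intro k hk1 hk2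
    rcases hr4 with h' | h'
    · omega
    · calc k ^ 3 ≤ (r - 1) ^ 3 := by
            apply pow_le_pow_left₀ (by omega) (by omega) 3
          _ < el := h'
  · have : hi0 ≤ max el 2 := hhi0b.2.2
    omega
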